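-- pv_equiv track=rewrite | github.com/lamarmeigs/advent-of-code | 2025/06/solve.py | _parse_by_column
-- ===== SOURCE A (Python) =====
-- def _parse_by_column(raw_numbers: list[str]) -> list[int]:
--     columns = []
--     column = []
--     for i in range(len(raw_numbers[0])):
--         empty_column = True
--         number = ''
--         for line in raw_numbers:
--             character = line[i]
--             if not character.isspace():
--                 number += character
--                 empty_column = False
--
--         if empty_column:
--             columns.append(column)
--             column = []
--         else:
--             column.append(int(number))
--     return columns
-- ===== SOURCE B (Python) =====
-- def _parse_by_column(raw_numbers: list[str]) -> list[int]:
--     # Pass 1: explicit transpose into column strings (index access keeps the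
--     # IndexError on rows shorter than the first row, as in the original).
--     cols = [''.join(line[j] for line in raw_numbers)
--             for j in range(len(raw_numbers[0]))]
--     # Pass 2: split the column list on all-whitespace separator columns; a
--     # group is emitted only when a separator closes it (the trailing
--     # unterminated segment is never emitted).
--     groups = []
--     start = 0
--     for j in range(len(cols)):
--         if cols[j].isspace():
--             groups.append([int(''.join(c for c in col if not c.isspace()))
--                            for col in cols[start:j]])
--             start = j + 1
--     return groups
-- ===== Notes on version B (the rewrite author's own statement) =====
-- stated objective: simpler
-- what changed: A interleaves reading each column (inner loop with an empty-column flag and a growing digit string) with grouping; B first builds the explicit transpose as a list of column strings, then splits that list on all-whitespace separator columns, converting each closed segment to ints at once (the trailing unterminated segment is naturally never emitted).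
import Mathlib
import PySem

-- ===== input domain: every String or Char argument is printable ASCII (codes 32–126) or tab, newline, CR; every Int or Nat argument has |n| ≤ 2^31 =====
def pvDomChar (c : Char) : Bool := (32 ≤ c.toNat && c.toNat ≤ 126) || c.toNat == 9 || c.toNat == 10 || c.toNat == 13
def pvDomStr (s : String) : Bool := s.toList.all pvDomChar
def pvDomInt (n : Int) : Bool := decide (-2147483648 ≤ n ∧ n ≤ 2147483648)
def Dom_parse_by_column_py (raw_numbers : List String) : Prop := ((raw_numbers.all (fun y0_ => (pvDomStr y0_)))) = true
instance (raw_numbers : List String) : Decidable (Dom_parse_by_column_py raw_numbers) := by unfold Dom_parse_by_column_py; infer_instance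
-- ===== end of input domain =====

-- B replaces A's interleaved inner loop (flag + growing digit string) by a two-pass
-- decomposition: build the explicit transpose (list of column character lists), then
-- split that list on all-whitespace separator columns, converting each closed segment
-- at once; objective: simpler.

-- ===== PORT A =====
def parse_by_column_py (raw_numbers : List String) : List (List Int) :=
  let res := (PySem.List.pyRange 0 (PySem.Str.len (PySem.List.pyGetD raw_numbers 0 "")) 1).foldl
    (fun (st : List (List Int) × List Int) i =>
      -- inner loop over lines: state (empty_column, number)
      let inner := raw_numbers.foldl
        (fun (st2 : Bool × List Char) line =>
          let character := PySem.List.pyGetD line.toList i ' '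
          if ¬ PySem.Chars.isspace character then (false, st2.2 ++ [character]) else st2)
        (true, [])
      if inner.1 then (st.1 ++ [st.2], [])
      else (st.1, st.2 ++ [(PySem.Int.ofChars? inner.2).getD 0]))
    ([], [])
  res.1

-- ===== PORT B =====
def parse_by_column_py_alt (raw_numbers : List String) : List (List Int) :=
  -- pass 1: the transpose, one character list per column
  let cols : List (List Char) :=
    (PySem.List.pyRange 0 (PySem.Str.len (PySem.List.pyGetD raw_numbers 0 "")) 1).map
      (fun j => raw_numbers.map (fun line => PySem.List.pyGetD line.toList j ' '))
  -- pass 2: split on all-whitespace separator columns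
  let res := (PySem.List.pyRange 0 (cols.length : Int) 1).foldl
    (fun (st : List (List Int) × Int) j =>
      if PySem.Chars.strIsspace (PySem.List.pyGetD cols j []) then
        (st.1 ++ [(PySem.List.slice cols (some st.2) (some j)).map
          (fun col => (PySem.Int.ofChars? (col.filter (fun c => !PySem.Chars.isspace c))).getD 0)],
         j + 1)
      else st)
    ([], (0 : Int))
  res.1

-- ===== PRECONDITION & SPEC =====
-- Pre_ excludes exactly the inputs on which Python A raises: the empty list
-- (IndexError on raw_numbers[0]), a line shorter than the first line (IndexError
-- on line[i]), and a column whose non-space characters are not a valid int literal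
-- (ValueError in int(number)).
def Pre_parse_by_column_py (raw_numbers : List String) : Prop :=
  raw_numbers ≠ [] ∧
  (∀ line ∈ raw_numbers, (raw_numbers.headD "").toList.length ≤ line.toList.length) ∧
  (∀ j < (raw_numbers.headD "").toList.length,
    ((raw_numbers.map (fun line => line.toList.getD j ' ')).all PySem.Chars.isspace = true) ∨
    (PySem.Int.ofChars? ((raw_numbers.map (fun line => line.toList.getD j ' ')).filter
        (fun c => !PySem.Chars.isspace c))).isSome = true)
instance (raw_numbers : List String) : Decidable (Pre_parse_by_column_py raw_numbers) := by
  unfold Pre_parse_by_column_py; infer_instance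

def pvWitness_parse_by_column_py : List String := ["12 3", "45 6"]

def Spec_parse_by_column_py (raw_numbers : List String) (out : List (List Int)) : Prop :=
  out = parse_by_column_py_alt raw_numbers
instance (raw_numbers : List String) (out : List (List Int)) : Decidable (Spec_parse_by_column_py raw_numbers out) := by
  unfold Spec_parse_by_column_py; infer_instance

-- ===== CLAIM (what is proved, stated in full; the proofs are below) =====
def Claim_equal_parse_by_column_py : Prop := ∀ (raw_numbers : List String), Dom_parse_by_column_py raw_numbers → Pre_parse_by_column_py raw_numbers → Spec_parse_by_column_py raw_numbers (parse_by_column_py raw_numbers)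

-- ===== LEMMAS AND PROOFS =====

-- column j as a character list (out-of-range characters default to ' ', which
-- Pre_ rules out for j below the first line's length)
def pvCol (raw : List String) (j : Nat) : List Char :=
  raw.map (fun line => PySem.List.pyGetD line.toList (j : Int) ' ')

def pvSep (raw : List String) (j : Nat) : Bool :=
  (pvCol raw j).all PySem.Chars.isspace

def pvVal (raw : List String) (j : Nat) : Int :=
  (PySem.Int.ofChars? ((pvCol raw j).filter (fun c => !PySem.Chars.isspace c))).getD 0

-- clean step functions both ports reduce to
def pvStepA (raw : List String) (st : List (List Int) × List Int) (j : Nat) :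
    List (List Int) × List Int :=
  if pvSep raw j then (st.1 ++ [st.2], []) else (st.1, st.2 ++ [pvVal raw j])

def pvStepB (raw : List String) (n : Nat) (st : List (List Int) × Int) (j : Nat) :
    List (List Int) × Int :=
  if pvSep raw j then
    (st.1 ++ [(PySem.List.slice ((List.range n).map (pvCol raw)) (some st.2) (some (j : Int))).map
        (fun col => (PySem.Int.ofChars? (col.filter (fun c => !PySem.Chars.isspace c))).getD 0)],
     (j : Int) + 1)
  else st

lemma pvInnerA (raw : List String) (j : Int) (b : Bool) (cs : List Char) :
    raw.foldl
      (fun (st2 : Bool × List Char) line =>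
        let character := PySem.List.pyGetD line.toList j ' '
        if ¬ PySem.Chars.isspace character then (false, st2.2 ++ [character]) else st2)
      (b, cs)
    = (b && (raw.map (fun line => PySem.List.pyGetD line.toList j ' ')).all PySem.Chars.isspace,
       cs ++ (raw.map (fun line => PySem.List.pyGetD line.toList j ' ')).filter
         (fun c => !PySem.Chars.isspace c)) := by
  induction raw generalizing b cs with
  | nil => simp
  | cons line rest ih =>
    rw [List.foldl_cons]
    by_cases h : PySem.Chars.isspace (PySem.List.pyGetD line.toList j ' ') = true
    · show List.foldl _ (if ¬ PySem.Chars.isspace (PySem.List.pyGetD line.toList j ' ') = true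
          then _ else (b, cs)) rest = _
      rw [if_neg (by simp [h]), ih]
      simp [h]
    · show List.foldl _ (if ¬ PySem.Chars.isspace (PySem.List.pyGetD line.toList j ' ') = true
          then (false, cs ++ [PySem.List.pyGetD line.toList j ' ']) else _) rest = _
      rw [if_pos (by simp [h]), ih]
      simp [h]

lemma pvA_eq (raw : List String) :
    parse_by_column_py raw
    = ((List.range (PySem.List.pyGetD raw 0 "").toList.length).foldl (pvStepA raw) ([], [])).1 := by
  unfold parse_by_column_py
  dsimp only
  rw [PySem.Str.len_eq, PySem.List.pyRange_zero_natCast, List.foldl_map]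
  congr 1
  apply PySem.List.foldl_congr_mem
  intro acc k _
  dsimp only
  rw [pvInnerA]
  simp only [Bool.true_and, List.nil_append]
  rfl

lemma pvSlice_eq (raw : List String) (n s j : Nat) (hj : j ≤ n) :
    PySem.List.slice ((List.range n).map (pvCol raw)) (some (s : Int)) (some (j : Int))
    = (List.range' s (j - s)).map (pvCol raw) := by
  rw [PySem.List.slice_natCast, ← List.map_drop, ← List.map_take]
  congr 1
  apply List.ext_getElem
  · simp; omega
  · intro i h1 h2
    simp only [List.getElem_take, List.getElem_drop, List.getElem_range, List.getElem_range']
    simp at h1 h2 ⊢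

lemma pvLoop (raw : List String) (n : Nat) :
    ∀ (k j s : Nat) (acc : List (List Int)), s ≤ j → j + k ≤ n →
    ((List.range' j k).foldl (pvStepA raw) (acc, (List.range' s (j - s)).map (pvVal raw))).1
    = ((List.range' j k).foldl (pvStepB raw n) (acc, (s : Int))).1 := by
  intro k
  induction k with
  | zero => intro j s acc _ _; simp
  | succ k ih =>
    intro j s acc hs hj
    rw [List.range'_succ, List.foldl_cons, List.foldl_cons]
    by_cases hsep : pvSep raw j = true
    · simp only [pvStepA, pvStepB, hsep, if_pos]
      rw [pvSlice_eq raw n s j (by omega)]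
      have hco : ((fun col => (PySem.Int.ofChars?
            (col.filter (fun c => !PySem.Chars.isspace c))).getD 0) ∘ pvCol raw) = pvVal raw :=
        funext (fun _ => rfl)
      have hcast : ((j : Nat) : Int) + 1 = (((j + 1 : Nat)) : Int) := by push_cast; ring
      rw [List.map_map, hco, hcast]
      have := ih (j+1) (j+1) (acc ++ [(List.range' s (j - s)).map (pvVal raw)])
        (le_refl _) (by omega)
      simpa using this
    · simp only [pvStepA, pvStepB, hsep, if_neg, Bool.false_eq_true, not_false_iff]
      have hr : (List.range' s (j - s)).map (pvVal raw) ++ [pvVal raw j]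
          = (List.range' s ((j + 1) - s)).map (pvVal raw) := by
        have h1 : (j + 1) - s = (j - s) + 1 := by omega
        rw [h1, List.range'_concat]
        have h2 : s + 1 * (j - s) = j := by omega
        rw [h2, List.map_append, List.map_cons, List.map_nil]
      rw [hr]
      exact ih (j+1) s acc (by omega) (by omega)

lemma pvB_eq (raw : List String) (hne : raw ≠ []) :
    parse_by_column_py_alt raw
    = ((List.range (PySem.List.pyGetD raw 0 "").toList.length).foldl
        (pvStepB raw (PySem.List.pyGetD raw 0 "").toList.length) ([], (0 : Int))).1 := by
  unfold parse_by_column_py_alt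
  dsimp only
  rw [PySem.Str.len_eq, PySem.List.pyRange_zero_natCast]
  set n := (PySem.List.pyGetD raw 0 "").toList.length with hn
  have hcols : (List.map (fun k : Nat => ((k : Int))) (List.range n)).map
      (fun j => raw.map (fun line => PySem.List.pyGetD line.toList j ' '))
      = (List.range n).map (pvCol raw) := by
    rw [List.map_map]; rfl
  rw [hcols]
  have hlen : ((List.range n).map (pvCol raw)).length = n := by simp
  rw [hlen, PySem.List.pyRange_zero_natCast, List.foldl_map]
  congr 1
  apply PySem.List.foldl_congr_mem
  intro acc k hk
  rw [List.mem_range] at hk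
  have hget : PySem.List.pyGetD ((List.range n).map (pvCol raw)) ((k : Nat) : Int) []
      = pvCol raw k := by
    rw [PySem.List.pyGetD_natCast]
    simp [List.getD_eq_getElem?_getD, hk]
  have hssp : PySem.Chars.strIsspace (pvCol raw k) = pvSep raw k := by
    unfold PySem.Chars.strIsspace pvSep
    have hemp : (pvCol raw k).isEmpty = false := by
      unfold pvCol
      cases raw with
      | nil => exact absurd rfl hne
      | cons a l => simp
    simp [hemp]
  rw [hget, hssp]
  rfl

lemma pvPorts_eq (raw : List String) (hne : raw ≠ []) :
    parse_by_column_py raw = parse_by_column_py_alt raw := by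
  rw [pvA_eq, pvB_eq raw hne]
  set n := (PySem.List.pyGetD raw 0 "").toList.length
  have h := pvLoop raw n n 0 0 ([] : List (List Int)) (le_refl 0) (by omega)
  simpa [List.range_eq_range'] using h

-- ===== VERDICT (by name: the statement is the Claim_ definition above) =====
theorem parse_by_column_py_spec : Claim_equal_parse_by_column_py := by
  intro raw _ hpre
  unfold Spec_parse_by_column_py
  exact pvPorts_eq raw hpre.1
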